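-- pv_equiv track=rewrite | github.com/nomuraya-games/tanuki-nazo | generator.py | generate_multi_delete_candidates
-- ===== SOURCE A (Python) =====
-- def _insert_all(word: str, insert: str) -> list[str]:
--     """wordの全挿入位置にinsertを挿入した文字列のリストを返す"""
--     return [word[:pos] + insert + word[pos:] for pos in range(len(word) + 1)]
--
-- def generate_multi_delete_candidates(answer: str, rule_chars: list[str]) -> list[str]:
--     """削除系複数ルールの逆適用: 答えにrule_charsを全挿入位置の組み合わせで挿入。
--     rule_chars = [ルール1の削除文字, ルール2の削除文字, ...]
--     """
--     candidates = [answer]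
--     for rc in rule_chars:
--         next_candidates = []
--         for base in candidates:
--             next_candidates.extend(_insert_all(base, rc))
--         candidates = next_candidates
--     return candidates
-- ===== SOURCE B (Python) =====
-- def _expand(s: str, rule_chars: list[str], i: int) -> list[str]:
--     """rule_chars[i:] を s に深さ優先で挿入した結果のリスト"""
--     if i == len(rule_chars):
--         return [s]
--     rc = rule_chars[i]
--     out = []
--     for pos in range(len(s) + 1):
--         out.extend(_expand(s[:pos] + rc + s[pos:], rule_chars, i + 1))
--     return out
--
-- def generate_multi_delete_candidates(answer: str, rule_chars: list[str]) -> list[str]: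
--     """削除系複数ルールの逆適用: 答えにrule_charsを全挿入位置の組み合わせで挿入。
--     rule_chars = [ルール1の削除文字, ルール2の削除文字, ...]
--     """
--     return _expand(answer, rule_chars, 0)
-- ===== Notes on version B (the rewrite author's own statement) =====
-- stated objective: alternative
-- what changed: Replaces A's breadth-first level-by-level rebuilding of the whole candidate list after each rule with a single depth-first recursion over the rule list that emits each fully-inserted string directly into the output.
import Mathlib
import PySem

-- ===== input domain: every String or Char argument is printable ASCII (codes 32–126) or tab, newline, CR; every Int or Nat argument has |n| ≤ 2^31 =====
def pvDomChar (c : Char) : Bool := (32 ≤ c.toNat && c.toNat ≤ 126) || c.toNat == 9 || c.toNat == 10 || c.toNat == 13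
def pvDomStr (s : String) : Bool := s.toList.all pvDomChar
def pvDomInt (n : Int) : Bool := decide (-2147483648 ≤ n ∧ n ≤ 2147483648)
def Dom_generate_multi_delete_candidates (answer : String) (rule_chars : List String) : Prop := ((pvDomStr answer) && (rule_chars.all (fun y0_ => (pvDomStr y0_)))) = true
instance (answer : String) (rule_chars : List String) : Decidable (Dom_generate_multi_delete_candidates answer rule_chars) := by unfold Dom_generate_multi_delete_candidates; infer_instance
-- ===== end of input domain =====

-- B replaces A's breadth-first rebuild of the whole candidate list per rule with a
-- depth-first recursion over the rules emitting finished strings directly (objective: alternative).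

-- s[:pos] + ins + s[pos:]  (the insertion expression both Pythons write literally)
def pvStrIns (s : String) (ins : String) (pos : Int) : String :=
  PySem.Str.slice s none (some pos) ++ ins ++ PySem.Str.slice s (some pos) none

-- ===== PORT A =====
-- _insert_all: comprehension over range(len(word)+1)
def pv_insert_all (word : String) (ins : String) : List String :=
  (PySem.List.pyRange 0 ((word.length : Int) + 1) 1).map (pvStrIns word ins)

def generate_multi_delete_candidates (answer : String) (rule_chars : List String) : List String :=
  rule_chars.foldl
    (fun candidates rc => candidates.foldl (fun next base => next ++ pv_insert_all base rc) [])
    [answer]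

-- ===== PORT B =====
-- rec(s, i): recursion over the remaining rules; the for-loop's appends become a flatMap
def pvRec : String → List String → List String
  | s, [] => [s]
  | s, rc :: rest =>
      (PySem.List.pyRange 0 ((s.length : Int) + 1) 1).flatMap
        (fun pos => pvRec (pvStrIns s rc pos) rest)

def generate_multi_delete_candidates_alt (answer : String) (rule_chars : List String) : List String :=
  pvRec answer rule_chars

-- ===== PRECONDITION & SPEC =====
def Spec_generate_multi_delete_candidates (answer : String) (rule_chars : List String) (out : List String) : Prop := out = generate_multi_delete_candidates_alt answer rule_chars
instance (answer : String) (rule_chars : List String) (out : List String) : Decidable (Spec_generate_multi_delete_candidates answer rule_chars out) := by unfold Spec_generate_multi_delete_candidates; infer_instance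

-- ===== CLAIM (what is proved, stated in full; the proofs are below) =====
def Claim_equal_generate_multi_delete_candidates : Prop := ∀ (answer : String) (rule_chars : List String), Dom_generate_multi_delete_candidates answer rule_chars → Spec_generate_multi_delete_candidates answer rule_chars (generate_multi_delete_candidates answer rule_chars)

-- ===== LEMMAS AND PROOFS =====

-- A's inner loop (extend over candidates) = flatMap
theorem pv_inner_foldl (cands : List String) (rc : String) (acc : List String) :
    cands.foldl (fun next base => next ++ pv_insert_all base rc) acc
      = acc ++ cands.flatMap (fun b => pv_insert_all b rc) := by
  induction cands generalizing acc with
  | nil => simp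
  | cons b bs ih => simp [ih, List.flatMap_cons]

-- A's outer loop over any starting candidate list = flatMap of B's recursion
theorem pv_main (rules : List String) (cands : List String) :
    rules.foldl
        (fun candidates rc => candidates.foldl (fun next base => next ++ pv_insert_all base rc) [])
        cands
      = cands.flatMap (fun s => pvRec s rules) := by
  induction rules generalizing cands with
  | nil => simp [pvRec]
  | cons rc rest ih =>
      rw [List.foldl_cons, pv_inner_foldl, List.nil_append, ih, List.flatMap_assoc]
      congr 1
      funext s
      simp [pvRec, pv_insert_all, List.flatMap_map]

-- ===== VERDICT (by name: the statement is the Claim_ definition above) =====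
theorem generate_multi_delete_candidates_spec : Claim_equal_generate_multi_delete_candidates := by
  intro answer rule_chars _
  unfold Spec_generate_multi_delete_candidates generate_multi_delete_candidates generate_multi_delete_candidates_alt
  rw [pv_main]
  simp
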